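-- pv_equiv track=rewrite | github.com/Zefick/Advent-of-Code-2016 | src/Python/2019/Day16.py | fft2
-- ===== SOURCE A (Python) =====
-- def fft2(input):
--     input = input[::-1]
--     for i in range(100):
--         nextInput, s = [], 0
--         for i in input:
--             s = (s + i) % 10
--             nextInput.append(s)
--         input = nextInput
--     return input[::-1]
-- ===== SOURCE B (Python) =====
-- def fft2(input):
--     # Closed form: 100 phases of suffix-cumulative-sum mod 10 equal a
--     # binomial-weighted suffix sum with coefficients C(99+d, d) mod 10.
--     n = len(input)
--     coeffs = []
--     cur = 1
--     for d in range(n):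
--         if d:
--             cur = cur * (99 + d) // d   # exact: cur stays C(99+d, d)
--         coeffs.append(cur % 10)
--     return [sum(coeffs[j - i] * input[j] for j in range(i, n)) % 10
--             for i in range(n)]
-- ===== Notes on version B (the rewrite author's own statement) =====
-- stated objective: alternative
-- what changed: B replaces the 100-phase iterated cumulative-sum loop by a closed form: each output digit is a binomial-weighted suffix sum, with coefficients C(99+d,d) mod 10 built once by the multiplicative recurrence.
import Mathlib
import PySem

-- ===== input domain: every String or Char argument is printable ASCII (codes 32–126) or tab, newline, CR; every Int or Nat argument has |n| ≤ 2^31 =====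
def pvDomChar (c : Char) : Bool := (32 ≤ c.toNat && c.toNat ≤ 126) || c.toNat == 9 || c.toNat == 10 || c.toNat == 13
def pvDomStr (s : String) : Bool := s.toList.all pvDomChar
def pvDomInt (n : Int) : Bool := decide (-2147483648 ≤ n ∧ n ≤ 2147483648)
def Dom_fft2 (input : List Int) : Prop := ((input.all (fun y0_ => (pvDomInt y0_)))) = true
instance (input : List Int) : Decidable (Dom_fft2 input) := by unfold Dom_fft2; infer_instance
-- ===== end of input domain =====

-- B replaces A's 100-phase iterated cumulative-sum loop by a closed form:
-- each output digit is a binomial-weighted suffix sum with coefficients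
-- C(99+d, d) mod 10 (alternative decomposition, not claimed faster).

-- ===== PORT A =====
-- literal transliteration of Source A: one phase = running-sum mod 10 appended element by element
def fft2Phase (inp : List Int) : List Int :=
  (inp.foldl (fun (p : List Int × Int) i =>
    let s := PySem.Int.mod (p.2 + i) 10
    (p.1 ++ [s], s)) ([], 0)).1

-- reverse (input[::-1], always some), 100 phases, reverse back
def fft2 (input : List Int) : List Int :=
  (PySem.List.slice?
    ((List.range 100).foldl (fun inp _ => fft2Phase inp)
      ((PySem.List.slice? input none none (-1)).getD []))
    none none (-1)).getD []

-- ===== PORT B =====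
-- coefficient list of Source B: C(99+d, d) % 10 via the exact multiplicative
-- recurrence (Python's '//' on the nonnegative cur is Nat division here)
def fft2AltCoeffs (n : Nat) : List Nat :=
  ((List.range n).foldl (fun (p : List Nat × Nat) d =>
      let cur := if d = 0 then p.2 else p.2 * (99 + d) / d
      (p.1 ++ [cur % 10], cur)) ([], 1)).1

-- Source B's comprehension: one weighted suffix sum per output index
-- (input[j] indexing is always in range in Source B, ported as getD;
--  '%' with positive divisor 10 is PySem.Int.mod)
def fft2_alt (input : List Int) : List Int :=
  (List.range input.length).map (fun i =>
    PySem.Int.mod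
      (((List.range' i (input.length - i)).map
          (fun j => (((fft2AltCoeffs input.length).getD (j - i) 0 : Nat) : Int) * input.getD j 0)).sum) 10)

-- ===== PRECONDITION & SPEC =====
def Spec_fft2 (input : List Int) (out : List Int) : Prop := out = fft2_alt input
instance (input : List Int) (out : List Int) : Decidable (Spec_fft2 input out) := by unfold Spec_fft2; infer_instance

-- ===== CLAIM (what is proved, stated in full; the proofs are below) =====
def Claim_equal_fft2 : Prop := ∀ (input : List Int), Dom_fft2 input → Spec_fft2 input (fft2 input)

-- ===== LEMMAS AND PROOFS =====

-- clean recursive form of one phase (running sum mod 10)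
def scanI (s : Int) : List Int → List Int
  | [] => []
  | x :: xs => (s + x) % 10 :: scanI ((s + x) % 10) xs

-- same phase in ZMod 10
def scanZ (s : ZMod 10) : List (ZMod 10) → List (ZMod 10)
  | [] => []
  | x :: xs => (s + x) :: scanZ (s + x) xs

lemma foldl_phase_eq (l : List Int) : ∀ (acc : List Int) (s : Int),
    (l.foldl (fun (p : List Int × Int) i =>
        let t := PySem.Int.mod (p.2 + i) 10
        (p.1 ++ [t], t)) (acc, s)).1 = acc ++ scanI s l := by
  induction l with
  | nil => intro acc s; simp [scanI]
  | cons x xs ih =>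
      intro acc s
      simp only [List.foldl_cons, scanI]
      rw [PySem.Int.mod_eq_emod_of_pos (by norm_num)]
      rw [ih]
      simp

lemma phase_eq_scanI (inp : List Int) : fft2Phase inp = scanI 0 inp := by
  unfold fft2Phase
  simpa using foldl_phase_eq inp [] 0

lemma foldl_range_const {α : Type} (f : α → α) : ∀ (k : ℕ) (l : α),
    (List.range k).foldl (fun x _ => f x) l = f^[k] l := by
  intro k
  induction k with
  | zero => intro l; simp
  | succ k ih =>
      intro l
      rw [List.range_succ, List.foldl_append, Function.iterate_succ_apply']
      simp [ih]

lemma fft2_eq (input : List Int) :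
    fft2 input = ((scanI 0)^[100] input.reverse).reverse := by
  unfold fft2
  simp only [PySem.List.slice?_none_none_neg_one, Option.getD_some]
  have h : (fun (inp : List Int) (_ : ℕ) => fft2Phase inp) =
      fun (inp : List Int) (_ : ℕ) => scanI 0 inp := by
    funext inp j; exact phase_eq_scanI inp
  rw [h, foldl_range_const (fun inp => scanI 0 inp) 100 input.reverse]

lemma scanI_length (s : Int) (l : List Int) : (scanI s l).length = l.length := by
  induction l generalizing s with
  | nil => rfl
  | cons x xs ih => simp [scanI, ih]

lemma iterI_length (k : ℕ) (l : List Int) : ((scanI 0)^[k] l).length = l.length := by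
  induction k generalizing l with
  | zero => rfl
  | succ k ih => rw [Function.iterate_succ_apply]; rw [ih, scanI_length]

lemma scanI_mem_mod (l : List Int) : ∀ (s x : Int), x ∈ scanI s l → x % 10 = x := by
  induction l with
  | nil => intro s x h; simp [scanI] at h
  | cons a as ih =>
      intro s x h
      simp only [scanI, List.mem_cons] at h
      rcases h with h | h
      · rw [h]; exact Int.emod_emod_of_dvd _ dvd_rfl
      · exact ih _ _ h

lemma iterI_mem_mod (k : ℕ) (hk : k ≠ 0) (l : List Int) (x : Int)
    (h : x ∈ (scanI 0)^[k] l) : x % 10 = x := by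
  obtain ⟨m, rfl⟩ : ∃ m, k = m + 1 := ⟨k - 1, by omega⟩
  rw [Function.iterate_succ_apply'] at h
  exact scanI_mem_mod _ _ _ h

-- explicit cast (named, so list maps stay plain `List.map cz`)
def cz (x : Int) : ZMod 10 := (x : ZMod 10)

-- cast Int → ZMod 10 kills % 10
lemma cast_emod (a : Int) : (((a % 10 : Int) : ZMod 10)) = (a : ZMod 10) := by
  have h10 : (10 : ZMod 10) = 0 := by decide
  rw [Int.emod_def]
  push_cast
  rw [h10]
  ring

lemma emod_eq_of_cast {a b : Int} (h : cz a = cz b) :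
    a % 10 = b % 10 := by
  have h' : (a : ZMod 10) = (b : ZMod 10) := h
  have := (ZMod.intCast_eq_intCast_iff a b 10).1 h'
  simpa [Int.ModEq] using this

lemma scanI_map (l : List Int) : ∀ s : Int,
    (scanI s l).map cz = scanZ (cz s) (l.map cz) := by
  induction l with
  | nil => intro s; rfl
  | cons x xs ih =>
      intro s
      have hc : cz ((s + x) % 10) = cz s + cz x := by
        simp only [cz]; rw [cast_emod]; push_cast; ring
      simp only [scanI, List.map_cons, scanZ]
      rw [ih ((s + x) % 10), hc]

lemma iterI_map (k : ℕ) (l : List Int) :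
    ((scanI 0)^[k] l).map cz = (scanZ 0)^[k] (l.map cz) := by
  induction k generalizing l with
  | zero => rfl
  | succ k ih =>
      rw [Function.iterate_succ_apply', Function.iterate_succ_apply']
      rw [← ih]
      have := scanI_map ((scanI 0)^[k] l) 0
      simpa [cz] using this

lemma getD_map_cast (l : List Int) : ∀ d : ℕ,
    (l.map cz).getD d 0 = cz (l.getD d 0) := by
  induction l with
  | nil => intro d; simp [cz]
  | cons a as ih =>
      intro d
      cases d with
      | zero => simp
      | succ d =>
          simp only [List.map_cons, List.getD_cons_succ]
          exact ih d

lemma scanZ_length (s : ZMod 10) (l : List (ZMod 10)) : (scanZ s l).length = l.length := by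
  induction l generalizing s with
  | nil => rfl
  | cons x xs ih => simp [scanZ, ih]

lemma iterZ_length (k : ℕ) (l : List (ZMod 10)) : ((scanZ 0)^[k] l).length = l.length := by
  induction k generalizing l with
  | zero => rfl
  | succ k ih => rw [Function.iterate_succ_apply]; rw [ih, scanZ_length]

lemma scanZ_getD (l : List (ZMod 10)) : ∀ (s : ZMod 10) (d : ℕ), d < l.length →
    (scanZ s l).getD d 0 = s + ∑ e ∈ Finset.range (d + 1), l.getD e 0 := by
  induction l with
  | nil => intro s d h; exact absurd h (by simp)
  | cons x xs ih =>
      intro s d h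
      cases d with
      | zero =>
          show s + x = s + ∑ e ∈ Finset.range 1, (x :: xs).getD e 0
          rw [Finset.sum_range_one, List.getD_cons_zero]
      | succ d =>
          have hd : d < xs.length := by simpa using h
          simp only [scanZ, List.getD_cons_succ]
          rw [ih (s + x) d hd, Finset.sum_range_succ' (fun e => (x :: xs).getD e 0) (d + 1)]
          simp only [List.getD_cons_succ, List.getD_cons_zero]
          ring

-- hockey stick: ∑_{m ≤ M} C(k+m, m) = C(k+1+M, M)
lemma hockey (k : ℕ) : ∀ M : ℕ,
    ∑ m ∈ Finset.range (M + 1), Nat.choose (k + m) m = Nat.choose (k + 1 + M) M := by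
  intro M
  induction M with
  | zero => simp
  | succ M ih =>
      have e1 : k + (M + 1) = k + 1 + M := by omega
      have e2 : k + 1 + (M + 1) = (k + 1 + M) + 1 := by omega
      rw [Finset.sum_range_succ, ih, e1, e2, Nat.choose_succ_succ]

-- triangle sum swap (range form)
lemma tri {β : Type} [AddCommMonoid β] (F : ℕ → ℕ → β) : ∀ d : ℕ,
    ∑ e ∈ Finset.range (d + 1), ∑ f ∈ Finset.range (e + 1), F e f =
      ∑ f ∈ Finset.range (d + 1), ∑ m ∈ Finset.range (d + 1 - f), F (f + m) f := by
  intro d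
  induction d with
  | zero => simp
  | succ d ih =>
      rw [Finset.sum_range_succ, ih]
      rw [Finset.sum_range_succ (fun f => ∑ m ∈ Finset.range (d + 2 - f), F (f + m) f)]
      have h1 : ∀ f ∈ Finset.range (d + 1),
          ∑ m ∈ Finset.range (d + 2 - f), F (f + m) f =
            (∑ m ∈ Finset.range (d + 1 - f), F (f + m) f) + F (d + 1) f := by
        intro f hf
        have hf' : f < d + 1 := Finset.mem_range.1 hf
        have hr : d + 2 - f = (d + 1 - f) + 1 := by omega
        rw [hr, Finset.sum_range_succ]
        congr 2
        omega
      rw [Finset.sum_congr rfl h1, Finset.sum_add_distrib]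
      have h2 : ∑ m ∈ Finset.range (d + 2 - (d + 1)), F (d + 1 + m) (d + 1) = F (d + 1) (d + 1) := by
        have hr : d + 2 - (d + 1) = 1 := by omega
        rw [hr]; simp
      rw [h2, Finset.sum_range_succ (fun f => F (d + 1) f)]
      abel

-- closed form for k+1 phases in ZMod 10
lemma iterZ_getD (k : ℕ) : ∀ (l : List (ZMod 10)) (d : ℕ), d < l.length →
    ((scanZ 0)^[k + 1] l).getD d 0 =
      ∑ e ∈ Finset.range (d + 1),
        ((Nat.choose (k + (d - e)) (d - e) : ℕ) : ZMod 10) * l.getD e 0 := by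
  induction k with
  | zero =>
      intro l d hd
      rw [Function.iterate_one, scanZ_getD l 0 d hd, zero_add]
      refine Finset.sum_congr rfl ?_
      intro e he
      simp
  | succ k ih =>
      intro l d hd
      rw [Function.iterate_succ_apply']
      have hlen : ((scanZ 0)^[k + 1] l).length = l.length := iterZ_length _ _
      rw [scanZ_getD _ 0 d (by rw [hlen]; exact hd), zero_add]
      have h1 : ∀ e ∈ Finset.range (d + 1),
          ((scanZ 0)^[k + 1] l).getD e 0 =
            ∑ f ∈ Finset.range (e + 1),
              ((Nat.choose (k + (e - f)) (e - f) : ℕ) : ZMod 10) * l.getD f 0 := by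
        intro e he
        have he' : e < l.length := lt_of_lt_of_le (Finset.mem_range.1 he) (by omega)
        exact ih l e he'
      rw [Finset.sum_congr rfl h1]
      rw [tri (fun e f => ((Nat.choose (k + (e - f)) (e - f) : ℕ) : ZMod 10) * l.getD f 0) d]
      refine Finset.sum_congr rfl ?_
      intro f hf
      have hf' : f < d + 1 := Finset.mem_range.1 hf
      rw [← Finset.sum_mul]
      congr 1
      have h2 : ∀ m ∈ Finset.range (d + 1 - f),
          ((Nat.choose (k + (f + m - f)) (f + m - f) : ℕ) : ZMod 10) =
            ((Nat.choose (k + m) m : ℕ) : ZMod 10) := by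
        intro m hm
        have hm' : f + m - f = m := by omega
        rw [hm']
      rw [Finset.sum_congr rfl h2]
      have h3 : d + 1 - f = (d - f) + 1 := by omega
      rw [h3, ← Nat.cast_sum, hockey k (d - f)]

-- coefficients: the foldl builds exactly C(99+d, d) % 10
lemma coeffs_foldl_eq : ∀ n : ℕ,
    (List.range n).foldl (fun (p : List Nat × Nat) d =>
        let cur := if d = 0 then p.2 else p.2 * (99 + d) / d
        (p.1 ++ [cur % 10], cur)) ([], 1) =
      ((List.range n).map (fun d => Nat.choose (99 + d) d % 10),
        Nat.choose (99 + (n - 1)) (n - 1)) := by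
  intro n
  induction n with
  | zero => simp
  | succ n ih =>
      rw [List.range_succ, List.foldl_append, ih]
      simp only [List.foldl_cons, List.foldl_nil, List.map_append, List.map_cons, List.map_nil]
      cases n with
      | zero => simp
      | succ m =>
          have hne : m + 1 ≠ 0 := by omega
          have hcur : Nat.choose (99 + (m + 1 - 1)) (m + 1 - 1) * (99 + (m + 1)) / (m + 1) =
              Nat.choose (99 + (m + 1)) (m + 1) := by
            have hrec := Nat.succ_mul_choose_eq (98 + (m + 1)) m
            have h1 : Nat.succ (98 + (m + 1)) = 99 + (m + 1) := by omega
            have h3 : Nat.succ m = m + 1 := rfl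
            rw [h1, h3] at hrec
            simp only [Nat.add_sub_cancel]
            have h2 : 99 + m = 98 + (m + 1) := by omega
            rw [h2, Nat.mul_comm, hrec]
            exact Nat.mul_div_cancel _ (by omega)
          simp only [hne, if_false]
          rw [hcur]
          simp

lemma coeffs_eq (n : ℕ) :
    fft2AltCoeffs n = (List.range n).map (fun d => Nat.choose (99 + d) d % 10) := by
  unfold fft2AltCoeffs
  rw [coeffs_foldl_eq]

-- list sum over range = Finset sum
lemma sum_map_range {β : Type} [AddCommMonoid β] (g : ℕ → β) : ∀ m : ℕ,
    ((List.range m).map g).sum = ∑ t ∈ Finset.range m, g t := by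
  intro m
  induction m with
  | zero => rfl
  | succ m ih => rw [List.range_succ, Finset.sum_range_succ, ← ih]; simp

lemma getD_reverse (l : List Int) (e : ℕ) (he : e < l.length) :
    l.reverse.getD e 0 = l.getD (l.length - 1 - e) 0 := by
  have h1 : e < l.reverse.length := by simpa using he
  have h2 : l.length - 1 - e < l.length := by omega
  rw [List.getD_eq_getElem _ _ h1, List.getD_eq_getElem _ _ h2]
  exact List.getElem_reverse h1

-- the pointwise identity, mod 10
lemma key (input : List Int) (i : ℕ) (hi : i < input.length) :
    ((scanI 0)^[100] input.reverse).getD (input.length - 1 - i) 0 % 10 =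
      (((List.range' i (input.length - i)).map
          (fun j => ((Nat.choose (99 + (j - i)) (j - i) % 10 : ℕ) : Int) * input.getD j 0)).sum) % 10 := by
  apply emod_eq_of_cast
  have hdlen : input.length - 1 - i < (input.reverse.map cz).length := by
    simp only [List.length_map, List.length_reverse]; omega
  have hA : cz (((scanI 0)^[100] input.reverse).getD (input.length - 1 - i) 0) =
      ∑ e ∈ Finset.range (input.length - 1 - i + 1),
        ((Nat.choose (99 + (input.length - 1 - i - e)) (input.length - 1 - i - e) : ℕ) : ZMod 10) *
          cz (input.getD (input.length - 1 - e) 0) := by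
    rw [← getD_map_cast, iterI_map]
    have h100 : (100 : ℕ) = 99 + 1 := rfl
    rw [h100, iterZ_getD 99 _ _ hdlen]
    refine Finset.sum_congr rfl ?_
    intro e he
    have he' : e < input.length := by
      have := Finset.mem_range.1 he; omega
    rw [getD_map_cast, getD_reverse input e he']
  have hB : cz (((List.range' i (input.length - i)).map
        (fun j => ((Nat.choose (99 + (j - i)) (j - i) % 10 : ℕ) : Int) * input.getD j 0)).sum) =
      ∑ t ∈ Finset.range (input.length - i),
        ((Nat.choose (99 + t) t : ℕ) : ZMod 10) * cz (input.getD (i + t) 0) := by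
    simp only [cz]
    rw [List.range'_eq_map_range, List.map_map, sum_map_range]
    push_cast
    refine Finset.sum_congr rfl ?_
    intro t ht
    simp only [Function.comp]
    have h1 : i + t - i = t := by omega
    rw [h1]
    push_cast
    rw [cast_emod]
    push_cast
    ring
  rw [hA, hB]
  rw [← Finset.sum_range_reflect
      (fun t => ((Nat.choose (99 + t) t : ℕ) : ZMod 10) * cz (input.getD (i + t) 0))
      (input.length - i)]
  have hni : input.length - 1 - i + 1 = input.length - i := by omega
  rw [hni]
  refine Finset.sum_congr rfl ?_
  intro e he
  have he' : e < input.length - i := Finset.mem_range.1 he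
  have ha : input.length - i - 1 - e = input.length - 1 - i - e := by omega
  have hb : i + (input.length - i - 1 - e) = input.length - 1 - e := by omega
  rw [hb, ha]

-- ===== VERDICT (by name: the statement is the Claim_ definition above) =====
theorem fft2_spec : Claim_equal_fft2 := by
  intro input _
  unfold Spec_fft2
  rw [fft2_eq]
  have hlenA : ((scanI 0)^[100] input.reverse).length = input.length := by
    rw [iterI_length]; simp
  unfold fft2_alt
  apply List.ext_getElem
  · simp only [List.length_reverse, List.length_map, List.length_range, hlenA]
  · intro i h1 h2
    have hi : i < input.length := by
      rw [List.length_reverse, hlenA] at h1; exact h1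
    rw [List.getElem_reverse, List.getElem_map, List.getElem_range]
    have hlt' : ((scanI 0)^[100] input.reverse).length - 1 - i <
        ((scanI 0)^[100] input.reverse).length := by
      rw [hlenA]; omega
    rw [← List.getD_eq_getElem ((scanI 0)^[100] input.reverse) 0 hlt']
    have hidx : ((scanI 0)^[100] input.reverse).length - 1 - i = input.length - 1 - i := by
      rw [hlenA]
    rw [hidx]
    have hlt : input.length - 1 - i < ((scanI 0)^[100] input.reverse).length := by
      rw [hlenA]; omega
    have hself : ((scanI 0)^[100] input.reverse).getD (input.length - 1 - i) 0 % 10 =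
        ((scanI 0)^[100] input.reverse).getD (input.length - 1 - i) 0 := by
      rw [List.getD_eq_getElem _ _ hlt]
      exact iterI_mem_mod 100 (by norm_num) _ _ (List.getElem_mem hlt)
    have hkey := key input i hi
    rw [hself] at hkey
    rw [hkey]
    rw [PySem.Int.mod_eq_emod_of_pos (by norm_num)]
    refine congrArg (fun z : Int => z % 10) ?_
    refine congrArg List.sum ?_
    apply List.map_congr_left
    intro j hj
    have hj' : i ≤ j ∧ j < i + (input.length - i) := List.mem_range'_1.1 hj
    have hji : j - i < input.length := by omega
    rw [coeffs_eq]
    rw [List.getD_eq_getElem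
      ((List.range input.length).map (fun d => Nat.choose (99 + d) d % 10)) 0
      (n := j - i) (by simpa using hji)]
    rw [List.getElem_map, List.getElem_range]
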